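-- pv_equiv track=rewrite | github.com/chapmanjacobd/library | library/utils/iterables.py | find_none_keys
-- ===== SOURCE A (Python) =====
-- def find_none_keys(list_of_dicts, keep_0=True):
--     none_keys = []
--
--     if not list_of_dicts:
--         return none_keys
--
--     keys = list_of_dicts[0].keys()
--     for key in keys:
--         is_key_none = True
--         for d in list_of_dicts:
--             value = d.get(key)
--             if value or (keep_0 and value == 0):
--                 is_key_none = False
--                 break
--         if is_key_none:
--             none_keys.append(key)
--
--     return none_keys
-- ===== SOURCE B (Python) =====
-- def find_none_keys(list_of_dicts, keep_0=True):
--     if not list_of_dicts: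
--         return []
--     # shrinking ordered candidate set, dicts as the outer loop
--     candidates = dict.fromkeys(list_of_dicts[0])
--     for d in list_of_dicts:
--         candidates = {
--             k: None
--             for k in candidates
--             if not (d.get(k) or (keep_0 and d.get(k) == 0))
--         }
--     return list(candidates)
-- ===== Notes on version B (the rewrite author's own statement) =====
-- stated objective: alternative
-- what changed: Transposes the loop nesting: instead of scanning all dicts per key with an early break, B maintains an ordered shrinking candidate set of still-all-none keys and filters it once per dict.
import Mathlib
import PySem

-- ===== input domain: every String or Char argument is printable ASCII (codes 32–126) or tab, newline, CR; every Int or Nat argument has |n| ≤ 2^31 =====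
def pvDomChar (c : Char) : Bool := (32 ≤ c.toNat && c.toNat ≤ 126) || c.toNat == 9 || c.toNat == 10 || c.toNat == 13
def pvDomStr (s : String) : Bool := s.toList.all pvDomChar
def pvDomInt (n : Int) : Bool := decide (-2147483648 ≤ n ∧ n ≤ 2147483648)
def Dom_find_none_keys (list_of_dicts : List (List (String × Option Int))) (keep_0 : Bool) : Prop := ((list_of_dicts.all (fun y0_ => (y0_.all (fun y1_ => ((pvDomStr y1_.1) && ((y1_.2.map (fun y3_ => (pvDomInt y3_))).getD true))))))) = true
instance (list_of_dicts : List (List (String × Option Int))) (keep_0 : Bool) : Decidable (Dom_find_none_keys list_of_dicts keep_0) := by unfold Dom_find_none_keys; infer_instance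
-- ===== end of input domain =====

-- B transposes the loop nesting: an ordered shrinking candidate set filtered once per dict,
-- instead of A's per-key scan over all dicts with an early break (objective: alternative).

-- `value or (keep_0 and value == 0)` on an Optional[int] value
def pvTruthy (keep_0 : Bool) (v : Option Int) : Bool :=
  (match v with | some n => n != 0 | none => false) || (keep_0 && v == some (0 : Int))

-- ===== PORT A =====
-- inner `for d in list_of_dicts` loop with its break; returns is_key_none
def pvScanA (ds : List (List (String × Option Int))) (keep_0 : Bool) (key : String) : Bool :=
  match ds with
  | [] => true
  | d :: rest =>
      if pvTruthy keep_0 ((PySem.Dict.ofList d).get? key).join then false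
      else pvScanA rest keep_0 key

def find_none_keys (list_of_dicts : List (List (String × Option Int))) (keep_0 : Bool) : List String :=
  match list_of_dicts with
  | [] => []
  | d0 :: _ =>
      ((PySem.Dict.ofList d0).keys).foldl
        (fun none_keys key =>
          if pvScanA list_of_dicts keep_0 key then none_keys ++ [key] else none_keys) []

-- ===== PORT B =====
def find_none_keys_alt (list_of_dicts : List (List (String × Option Int))) (keep_0 : Bool) : List String :=
  match list_of_dicts with
  | [] => []
  | d0 :: _ =>
      list_of_dicts.foldl
        (fun cands d =>
          cands.filter (fun k => !(pvTruthy keep_0 ((PySem.Dict.ofList d).get? k).join)))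
        ((PySem.Dict.ofList d0).keys)

-- ===== PRECONDITION & SPEC =====
def Spec_find_none_keys (list_of_dicts : List (List (String × Option Int))) (keep_0 : Bool) (out : List String) : Prop := out = find_none_keys_alt list_of_dicts keep_0
instance (list_of_dicts : List (List (String × Option Int))) (keep_0 : Bool) (out : List String) : Decidable (Spec_find_none_keys list_of_dicts keep_0 out) := by unfold Spec_find_none_keys; infer_instance

-- ===== CLAIM (what is proved, stated in full; the proofs are below) =====
def Claim_equal_find_none_keys : Prop := ∀ (list_of_dicts : List (List (String × Option Int))) (keep_0 : Bool), Dom_find_none_keys list_of_dicts keep_0 → Spec_find_none_keys list_of_dicts keep_0 (find_none_keys list_of_dicts keep_0)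

-- ===== LEMMAS AND PROOFS =====

-- A's inner scan is the `all` over the dicts
lemma pvScanA_eq_all (ds : List (List (String × Option Int))) (keep_0 : Bool) (key : String) :
    pvScanA ds keep_0 key
      = ds.all (fun d => !(pvTruthy keep_0 ((PySem.Dict.ofList d).get? key).join)) := by
  induction ds with
  | nil => rfl
  | cons d rest ih =>
      by_cases h : pvTruthy keep_0 ((PySem.Dict.ofList d).get? key).join = true <;>
        simp [pvScanA, List.all_cons, ih, h]

-- B's fold of filters is one filter by the conjunction over all dicts
lemma foldl_filter_eq_filter_all {α β : Type} (ds : List α) (p : α → β → Bool) (keys : List β) :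
    ds.foldl (fun c d => c.filter (p d)) keys
      = keys.filter (fun k => ds.all (fun d => p d k)) := by
  induction ds generalizing keys with
  | nil => simp
  | cons d rest ih =>
      simp only [List.foldl_cons, ih, List.filter_filter, List.all_cons]
      congr 1
      funext k
      exact Bool.and_comm _ _

-- ===== VERDICT (by name: the statement is the Claim_ definition above) =====
theorem find_none_keys_spec : Claim_equal_find_none_keys := by
  intro ds keep_0 _
  unfold Spec_find_none_keys
  cases ds with
  | nil => rfl
  | cons d0 rest =>
      simp only [find_none_keys, find_none_keys_alt,
        PySem.List.foldl_append_if_eq_filter, List.nil_append,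
        foldl_filter_eq_filter_all]
      apply List.filter_congr
      intro k _
      rw [pvScanA_eq_all]
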